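-- pv_equiv track=rewrite | github.com/braintrustdata/braintrust-migrate | braintrust_migrate/resources/datasets.py | _max_xact_id
-- ===== SOURCE A (Python) =====
-- from typing import Any, ClassVar
--
-- def _max_xact_id(events: list[dict[str, Any]]) -> str | None:
--     xacts: list[str] = []
--     for e in events:
--         x = e.get("_xact_id")
--         if isinstance(x, str) and x:
--             xacts.append(x)
--     if not xacts:
--         return None
--     try:
--         return str(max(int(x) for x in xacts))
--     except Exception:
--         return max(xacts)
-- ===== SOURCE B (Python) =====
-- def _max_xact_id(events):
--     best_str = None
--     all_numeric = True
--     best_int = None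
--     for e in events:
--         x = e.get("_xact_id")
--         if isinstance(x, str) and x:
--             if best_str is None or x > best_str:
--                 best_str = x
--             if all_numeric:
--                 try:
--                     v = int(x)
--                 except Exception:
--                     all_numeric = False
--                 else:
--                     if best_int is None or v > best_int:
--                         best_int = v
--     if best_str is None:
--         return None
--     if all_numeric:
--         return str(best_int)
--     return best_str
-- ===== Notes on version B (the rewrite author's own statement) =====
-- stated objective: alternative
-- what changed: Replaces A's collect-into-a-list followed by try int-max / except string-max with a single streaming pass that keeps a running lexical max, an all-numeric flag and a running int max, using explicit branching instead of try/except control flow.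
import Mathlib
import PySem

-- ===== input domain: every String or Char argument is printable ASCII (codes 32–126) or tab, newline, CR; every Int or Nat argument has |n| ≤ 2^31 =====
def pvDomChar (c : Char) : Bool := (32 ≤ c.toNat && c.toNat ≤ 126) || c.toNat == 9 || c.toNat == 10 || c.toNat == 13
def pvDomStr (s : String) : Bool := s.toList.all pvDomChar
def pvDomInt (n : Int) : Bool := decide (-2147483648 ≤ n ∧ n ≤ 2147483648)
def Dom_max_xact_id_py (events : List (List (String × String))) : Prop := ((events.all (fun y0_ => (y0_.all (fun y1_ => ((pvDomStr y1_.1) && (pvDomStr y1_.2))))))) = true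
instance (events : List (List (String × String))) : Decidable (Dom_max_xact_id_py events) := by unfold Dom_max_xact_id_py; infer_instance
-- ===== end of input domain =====

-- B replaces A's collect-then-two-max-calls by one streaming pass keeping a running
-- lexical max, an all-numeric flag and a running int max (objective: alternative).

-- ===== PORT A =====
-- all ints of the generator (int(x) for x in xs): none exactly where Python's max(...) raises
def pvAllInts : List String → Option (List Int)
  | [] => some []
  | x :: t =>
    match PySem.Int.ofStr? x, pvAllInts t with
    | some v, some vs => some (v :: vs)
    | _, _ => none

def max_xact_id_py (events : List (List (String × String))) : Option String :=
  let xacts := events.foldl (fun acc e =>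
    match (PySem.Dict.mk e).get? "_xact_id" with
    | some x => if x ≠ "" then acc ++ [x] else acc
    | none => acc) []
  if xacts = [] then none
  else
    match pvAllInts xacts with
    | some ints => (PySem.List.max? ints (fun y => y)).map PySem.Int.toStr
    | none => PySem.List.max? xacts (fun y => y)

-- ===== PORT B =====
-- loop body of Source B for a non-empty string x; state = (best_str, all_numeric, best_int)
def pvAltUpd (s : Option String × Bool × Option Int) (x : String) :
    Option String × Bool × Option Int :=
  let bs : Option String :=
    match s.1 with
    | none => some x
    | some b => if b < x then some x else some b
  if s.2.1 then
    match PySem.Int.ofStr? x with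
    | none => (bs, false, s.2.2)
    | some v =>
      (bs, true, some (match s.2.2 with | none => v | some b => if b < v then v else b))
  else (bs, false, s.2.2)

def max_xact_id_py_alt (events : List (List (String × String))) : Option String :=
  let st := events.foldl (fun s e =>
    match (PySem.Dict.mk e).get? "_xact_id" with
    | some x => if x ≠ "" then pvAltUpd s x else s
    | none => s) (none, true, none)
  match st.1 with
  | none => none
  | some bs => if st.2.1 then st.2.2.map PySem.Int.toStr else some bs

-- ===== PRECONDITION & SPEC =====
def Spec_max_xact_id_py (events : List (List (String × String))) (out : Option String) : Prop := out = max_xact_id_py_alt events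
instance (events : List (List (String × String))) (out : Option String) : Decidable (Spec_max_xact_id_py events out) := by unfold Spec_max_xact_id_py; infer_instance

-- ===== CLAIM (what is proved, stated in full; the proofs are below) =====
def Claim_equal_max_xact_id_py : Prop := ∀ (events : List (List (String × String))), Dom_max_xact_id_py events → Spec_max_xact_id_py events (max_xact_id_py events)

-- ===== LEMMAS AND PROOFS =====

-- the "_xact_id" strings one event contributes
def pvXact (e : List (String × String)) : List String :=
  match (PySem.Dict.mk e).get? "_xact_id" with
  | some x => if x ≠ "" then [x] else []
  | none => []

theorem pvIfMax {α : Type} [LinearOrder α] (b x : α) :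
    (if b < x then x else b) = max b x := by
  rcases lt_or_ge b x with h | h
  · simp [h, max_eq_right h.le]
  · simp [not_lt.mpr h, max_eq_left h]

theorem pvIfMaxStr (b x : String) :
    (if b.toList < x.toList then some x else some b) = some (max b x) := by
  rcases lt_or_ge b x with h | h
  · simp [String.lt_iff_toList_lt.mp h, max_eq_right h.le]
  · have : ¬ b.toList < x.toList := fun hc => absurd (String.lt_iff_toList_lt.mpr hc) (not_lt.mpr h)
    simp [this, max_eq_left h]

theorem pvAltUpd_false (b x : String) (bi : Option Int) :
    pvAltUpd (some b, false, bi) x = (some (max b x), false, bi) := by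
  simp [pvAltUpd, pvIfMaxStr]

theorem pvAltUpd_true_some (b x : String) (v w : Int) (hx : PySem.Int.ofStr? x = some w) :
    pvAltUpd (some b, true, some v) x = (some (max b x), true, some (max v w)) := by
  simp [pvAltUpd, hx, pvIfMaxStr, pvIfMax]

theorem pvAltUpd_true_none (b x : String) (bi : Option Int) (hx : PySem.Int.ofStr? x = none) :
    pvAltUpd (some b, true, bi) x = (some (max b x), false, bi) := by
  simp [pvAltUpd, hx, pvIfMaxStr]

theorem collect_eq_flatMap (events : List (List (String × String))) (acc : List String) :
    events.foldl (fun acc e =>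
      match (PySem.Dict.mk e).get? "_xact_id" with
      | some x => if x ≠ "" then acc ++ [x] else acc
      | none => acc) acc = acc ++ events.flatMap pvXact := by
  induction events generalizing acc with
  | nil => simp
  | cons e t ih =>
    simp only [List.foldl_cons, List.flatMap_cons, ih, pvXact]
    cases (PySem.Dict.mk e).get? "_xact_id" with
    | none => simp
    | some x => by_cases hx : x = "" <;> simp [hx]

theorem altFold_eq_flatMap (events : List (List (String × String)))
    (s : Option String × Bool × Option Int) :
    events.foldl (fun s e =>
      match (PySem.Dict.mk e).get? "_xact_id" with
      | some x => if x ≠ "" then pvAltUpd s x else s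
      | none => s) s = (events.flatMap pvXact).foldl pvAltUpd s := by
  induction events generalizing s with
  | nil => simp
  | cons e t ih =>
    simp only [List.foldl_cons, List.flatMap_cons, List.foldl_append, ih, pvXact]
    cases (PySem.Dict.mk e).get? "_xact_id" with
    | none => simp
    | some x => by_cases hx : x = "" <;> simp [hx]

-- once all_numeric is false, only best_str still moves (as a running max)
theorem foldl_upd_false (xs : List String) (b : String) (bi : Option Int) :
    xs.foldl pvAltUpd (some b, false, bi) = (some (xs.foldl max b), false, bi) := by
  induction xs generalizing b with
  | nil => rfl
  | cons x t ih => simp [pvAltUpd_false, ih]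

-- while every string parses, both running maxes track the folds
theorem foldl_upd_some (xs : List String) (ints : List Int)
    (h : pvAllInts xs = some ints) (b : String) (v : Int) :
    xs.foldl pvAltUpd (some b, true, some v)
      = (some (xs.foldl max b), true, some (ints.foldl max v)) := by
  induction xs generalizing ints b v with
  | nil =>
    simp only [pvAllInts, Option.some.injEq] at h
    subst h; rfl
  | cons x t ih =>
    simp only [pvAllInts] at h
    cases hx : PySem.Int.ofStr? x with
    | none => simp [hx] at h
    | some w =>
      cases ht : pvAllInts t with
      | none => simp [hx, ht] at h
      | some ws =>
        simp only [hx, ht, Option.some.injEq] at h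
        subst h
        simp [List.foldl_cons, pvAltUpd_true_some b x v w hx, ih ws ht]

-- if some string fails to parse, the flag ends up false and best_str is still the full max
theorem foldl_upd_none (xs : List String) (h : pvAllInts xs = none) (b : String) (v : Int) :
    ∃ bi, xs.foldl pvAltUpd (some b, true, some v) = (some (xs.foldl max b), false, bi) := by
  induction xs generalizing b v with
  | nil => simp [pvAllInts] at h
  | cons x t ih =>
    simp only [pvAllInts] at h
    cases hx : PySem.Int.ofStr? x with
    | none =>
      refine ⟨some v, ?_⟩
      simp [List.foldl_cons, pvAltUpd_true_none b x (some v) hx, foldl_upd_false]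
    | some w =>
      cases ht : pvAllInts t with
      | none =>
        obtain ⟨bi, hbi⟩ := ih ht (max b x) (max v w)
        exact ⟨bi, by simp [List.foldl_cons, pvAltUpd_true_some b x v w hx, hbi]⟩
      | some ws => simp [hx, ht] at h

-- ===== VERDICT (by name: the statement is the Claim_ definition above) =====
theorem max_xact_id_py_spec : Claim_equal_max_xact_id_py := by
  intro events _
  show max_xact_id_py events = max_xact_id_py_alt events
  unfold max_xact_id_py max_xact_id_py_alt
  rw [collect_eq_flatMap, altFold_eq_flatMap]
  simp only [List.nil_append]
  cases hxs : events.flatMap pvXact with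
  | nil => simp
  | cons x t =>
    simp only [List.foldl_cons]
    cases hx : PySem.Int.ofStr? x with
    | some w =>
      have h0 : pvAltUpd (none, true, none) x = (some x, true, some w) := by
        simp [pvAltUpd, hx]
      cases ht : pvAllInts t with
      | some ws =>
        have hax : pvAllInts (x :: t) = some (w :: ws) := by
          simp [pvAllInts, hx, ht]
        rw [hax, h0, foldl_upd_some t ws ht x w]
        simp [PySem.List.max?_id_cons]
      | none =>
        have hax : pvAllInts (x :: t) = none := by
          simp [pvAllInts, hx, ht]
        obtain ⟨bi, hbi⟩ := foldl_upd_none t ht x w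
        rw [hax, h0, hbi]
        simp [PySem.List.max?_id_cons]
    | none =>
      have h0 : pvAltUpd (none, true, none) x = (some x, false, none) := by
        simp [pvAltUpd, hx]
      have hax : pvAllInts (x :: t) = none := by
        simp [pvAllInts, hx]
      rw [hax, h0, foldl_upd_false t x none]
      simp [PySem.List.max?_id_cons]
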